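-- pv_equiv track=rewrite | github.com/chenxshuo/open_flamingo | open_flamingo/prompt_train/main.py | build_eval_prompt_sentence
-- ===== SOURCE A (Python) =====
-- def build_eval_prompt_sentence(number_of_media_tokens, number_of_text_tokens_per_media):
--     query_info = f"<image>Output:"
--     full_sentence = ""
--     for i in range(number_of_media_tokens):
--         full_sentence += f"<SoftImage>"
--         for j in range(number_of_text_tokens_per_media):
--             full_sentence += f"<SoftText>"
--         full_sentence += f"<|endofchunk|>"
--     full_sentence += query_info
--     return full_sentence
-- ===== SOURCE B (Python) =====
-- def _rep(s, n):
--     # repeat s n times by binary splitting (divide and conquer)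
--     if n <= 0:
--         return ""
--     half = _rep(s, n // 2)
--     return half + half + (s if n % 2 else "")
--
-- def build_eval_prompt_sentence(number_of_media_tokens, number_of_text_tokens_per_media):
--     if number_of_media_tokens <= 0:
--         return "<image>Output:"
--     chunk = "<SoftImage>" + _rep("<SoftText>", number_of_text_tokens_per_media) + "<|endofchunk|>"
--     return _rep(chunk, number_of_media_tokens) + "<image>Output:"
-- ===== Notes on version B (the rewrite author's own statement) =====
-- stated objective: alternative
-- what changed: Both counting loops are removed: repetition is computed by a divide-and-conquer doubling helper _rep (recursion on n//2, squaring the string), used once for the per-chunk '<SoftText>' run and once for the whole body; A instead appends token by token in nested loops.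
import Mathlib
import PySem

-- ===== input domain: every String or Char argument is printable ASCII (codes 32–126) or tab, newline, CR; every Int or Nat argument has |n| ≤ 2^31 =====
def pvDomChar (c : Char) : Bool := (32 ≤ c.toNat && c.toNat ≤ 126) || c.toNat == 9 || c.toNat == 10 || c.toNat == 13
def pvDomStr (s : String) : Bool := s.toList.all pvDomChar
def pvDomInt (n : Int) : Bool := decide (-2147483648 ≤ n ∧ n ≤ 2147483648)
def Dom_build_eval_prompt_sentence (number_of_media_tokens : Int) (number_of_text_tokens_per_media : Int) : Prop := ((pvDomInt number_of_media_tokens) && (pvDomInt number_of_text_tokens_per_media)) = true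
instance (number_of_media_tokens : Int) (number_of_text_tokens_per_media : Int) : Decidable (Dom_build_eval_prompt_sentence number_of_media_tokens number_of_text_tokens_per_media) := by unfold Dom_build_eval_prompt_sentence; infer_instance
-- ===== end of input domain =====

-- B removes both counting loops: repetition is computed by a divide-and-conquer doubling
-- helper (recursion on n // 2), a genuinely different strategy for building the same string.

-- ===== PORT A =====
def build_eval_prompt_sentence (number_of_media_tokens : Int) (number_of_text_tokens_per_media : Int) : String :=
  let query_info := "<image>Output:"
  let full_sentence := ""
  let full_sentence :=
    (PySem.List.pyRange 0 number_of_media_tokens 1).foldl (fun acc _ =>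
      let acc := acc ++ "<SoftImage>"
      let acc := (PySem.List.pyRange 0 number_of_text_tokens_per_media 1).foldl
                   (fun a _ => a ++ "<SoftText>") acc
      acc ++ "<|endofchunk|>") full_sentence
  full_sentence ++ query_info

-- ===== PORT B =====
-- _rep's recursion, on the Nat value of n (Python's n // 2 on a positive n is Nat division)
def pvRepNat (s : String) (n : Nat) : String :=
  if _h : n = 0 then "" else
    let half := pvRepNat s (n / 2)
    half ++ half ++ (if n % 2 = 1 then s else "")
termination_by n
decreasing_by exact Nat.div_lt_self (Nat.pos_of_ne_zero _h) (by norm_num)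

-- _rep(s, n): the 'n <= 0' guard, then the doubling recursion above
def pvRep (s : String) (n : Int) : String :=
  if n ≤ 0 then "" else pvRepNat s n.toNat

def build_eval_prompt_sentence_alt (number_of_media_tokens : Int) (number_of_text_tokens_per_media : Int) : String :=
  if number_of_media_tokens ≤ 0 then "<image>Output:" else
  let chunk := "<SoftImage>" ++ pvRep "<SoftText>" number_of_text_tokens_per_media ++ "<|endofchunk|>"
  pvRep chunk number_of_media_tokens ++ "<image>Output:"

-- ===== PRECONDITION & SPEC =====
def Spec_build_eval_prompt_sentence (number_of_media_tokens : Int) (number_of_text_tokens_per_media : Int) (out : String) : Prop := out = build_eval_prompt_sentence_alt number_of_media_tokens number_of_text_tokens_per_media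
instance (number_of_media_tokens : Int) (number_of_text_tokens_per_media : Int) (out : String) : Decidable (Spec_build_eval_prompt_sentence number_of_media_tokens number_of_text_tokens_per_media out) := by unfold Spec_build_eval_prompt_sentence; infer_instance

-- ===== CLAIM =====
def Claim_equal_build_eval_prompt_sentence : Prop := ∀ (number_of_media_tokens : Int) (number_of_text_tokens_per_media : Int), Dom_build_eval_prompt_sentence number_of_media_tokens number_of_text_tokens_per_media → Spec_build_eval_prompt_sentence number_of_media_tokens number_of_text_tokens_per_media (build_eval_prompt_sentence number_of_media_tokens number_of_text_tokens_per_media)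

-- ===== LEMMAS AND PROOFS =====

theorem foldl_append_shift (l : List String) (x y : String) :
    l.foldl (· ++ ·) (x ++ y) = x ++ l.foldl (· ++ ·) y := by
  induction l generalizing y with
  | nil => simp
  | cons a as ih => simpa [String.append_assoc] using ih (y ++ a)

theorem join_cons (a : String) (l : List String) : String.join (a :: l) = a ++ String.join l := by
  have h := foldl_append_shift l a ""
  simpa [String.join] using h

theorem join_replicate_add (a b : Nat) (s : String) :
    String.join (List.replicate (a + b) s)
      = String.join (List.replicate a s) ++ String.join (List.replicate b s) := by
  induction a with
  | zero => simp [String.join]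
  | succ k ih =>
    rw [Nat.succ_add, List.replicate_succ, join_cons, List.replicate_succ, join_cons, ih,
        String.append_assoc]

-- the doubling recursion computes exactly n copies of s
theorem pvRepNat_eq (s : String) (n : Nat) :
    pvRepNat s n = String.join (List.replicate n s) := by
  induction n using Nat.strong_induction_on with
  | _ n ih =>
    rw [pvRepNat]
    by_cases h : n = 0
    · simp [h, String.join]
    · have hlt : n / 2 < n := Nat.div_lt_self (Nat.pos_of_ne_zero h) (by norm_num)
      simp only [h, reduceDIte]
      rw [ih _ hlt]
      by_cases hp : n % 2 = 1
      · have hn : n = n / 2 + n / 2 + 1 := by omega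
        rw [hp, if_pos rfl]
        conv_rhs => rw [hn]
        rw [join_replicate_add, join_replicate_add]
        simp [String.join]
      · have hn : n = n / 2 + n / 2 := by omega
        rw [if_neg hp]
        conv_rhs => rw [hn]
        rw [join_replicate_add]
        simp [String.join]

theorem pvRep_eq (s : String) (n : Int) :
    pvRep s n = String.join (List.replicate n.toNat s) := by
  unfold pvRep
  by_cases h : n ≤ 0
  · simp [h, Int.toNat_of_nonpos h, String.join]
  · simp [h, pvRepNat_eq]

-- appending a constant string once per element of l = appending l.length copies
theorem foldl_const_append (l : List Int) (s init : String) :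
    l.foldl (fun acc _ => acc ++ s) init = init ++ String.join (List.replicate l.length s) := by
  induction l generalizing init with
  | nil => simp [String.join]
  | cons x xs ih => simp [List.foldl, ih, List.replicate_succ, join_cons, String.append_assoc]

-- A's outer loop body appends exactly one copy of B's chunk
theorem foldl_chunk (l : List Int) (t : Int) (init : String) :
    l.foldl (fun acc _ =>
        ((PySem.List.pyRange 0 t 1).foldl (fun a _ => a ++ "<SoftText>") (acc ++ "<SoftImage>"))
          ++ "<|endofchunk|>") init
      = init ++ String.join (List.replicate l.length
          ("<SoftImage>" ++ pvRep "<SoftText>" t ++ "<|endofchunk|>")) := by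
  induction l generalizing init with
  | nil => simp [String.join]
  | cons x xs ih =>
    simp only [List.foldl, ih]
    rw [foldl_const_append, List.length_cons, List.replicate_succ, join_cons]
    simp [pvRep_eq, PySem.List.length_pyRange_one, String.append_assoc]

-- ===== VERDICT =====
theorem build_eval_prompt_sentence_spec : Claim_equal_build_eval_prompt_sentence := by
  intro m t _
  simp only [Spec_build_eval_prompt_sentence, build_eval_prompt_sentence, build_eval_prompt_sentence_alt]
  by_cases hm : m ≤ 0
  · rw [PySem.List.pyRange_one_eq_nil hm]
    simp [hm]
  · rw [foldl_chunk]
    simp [hm, pvRep_eq, PySem.List.length_pyRange_one]
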